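-- pv_equiv track=rewrite | github.com/ghga-de/ghga-datasteward-kit | src/s3_upload.py | get_ranges
-- ===== SOURCE A (Python) =====
-- import math
--
-- PART_SIZE = 16 * 1024**2
--
-- def get_ranges(file_size: int):
--     """Calculate part ranges"""
--     num_parts = file_size / PART_SIZE
--     byte_ranges = [
--         (PART_SIZE * part_no, PART_SIZE * (part_no + 1) - 1)
--         for part_no in range(int(num_parts))
--     ]
--     if math.ceil(num_parts) != int(num_parts):
--         byte_ranges.append((PART_SIZE * int(num_parts), file_size - 1))
--
--     return byte_ranges
-- ===== SOURCE B (Python) =====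
-- PART_SIZE = 16 * 1024**2
--
--
-- def get_ranges(file_size: int):
--     """Calculate part ranges"""
--     byte_ranges = []
--     start = 0
--     while start < file_size:
--         byte_ranges.append((start, min(start + PART_SIZE, file_size) - 1))
--         start += PART_SIZE
--     return byte_ranges
-- ===== Notes on version B (the rewrite author's own statement) =====
-- stated objective: simpler
-- what changed: Replaced the comprehension over int(file_size/PART_SIZE) plus a ceil-based trailing-remainder special case by a single while loop that emits (start, min(start+PART_SIZE, file_size)-1) until start reaches file_size, with no division or ceil at all.
import Mathlib
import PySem

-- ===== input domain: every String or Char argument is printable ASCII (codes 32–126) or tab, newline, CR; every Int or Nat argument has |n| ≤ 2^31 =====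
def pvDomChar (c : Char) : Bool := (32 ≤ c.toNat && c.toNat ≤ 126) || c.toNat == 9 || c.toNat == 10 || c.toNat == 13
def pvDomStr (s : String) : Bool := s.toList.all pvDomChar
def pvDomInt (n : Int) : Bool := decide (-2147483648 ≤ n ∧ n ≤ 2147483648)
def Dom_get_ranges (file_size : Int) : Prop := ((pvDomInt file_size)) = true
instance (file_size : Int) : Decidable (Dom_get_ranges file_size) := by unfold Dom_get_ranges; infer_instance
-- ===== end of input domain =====

-- B replaces A's comprehension-over-int(file_size/PART_SIZE) plus trailing-remainder special case
-- by one uniform while loop with a min-clamped end (objective: simpler, same cost).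

def PART_SIZE : Int := 16 * 1024 ^ 2

-- ===== PORT A =====
-- num_parts = file_size / PART_SIZE is an EXACT binary float on |file_size| ≤ 2^31 (divisor is 2^24),
-- so int(num_parts) is truncating division (Int.tdiv) and math.ceil(num_parts) = -((-file_size) // PART_SIZE).
def get_ranges (file_size : Int) : List (Int × Int) :=
  let num_parts_int : Int := PySem.Int.truncdiv file_size PART_SIZE
  let byte_ranges := (PySem.List.pyRange 0 num_parts_int 1).map
      (fun part_no => (PART_SIZE * part_no, PART_SIZE * (part_no + 1) - 1))
  if -(PySem.Int.floordiv (-file_size) PART_SIZE) ≠ num_parts_int then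
    byte_ranges ++ [(PART_SIZE * num_parts_int, file_size - 1)]
  else
    byte_ranges

-- ===== PORT B =====
-- while start < file_size: append (start, min(start + PART_SIZE, file_size) - 1); start += PART_SIZE
def get_ranges_alt_loop (file_size start : Int) : List (Int × Int) :=
  if start < file_size then
    (start, min (start + PART_SIZE) file_size - 1) ::
      get_ranges_alt_loop file_size (start + PART_SIZE)
  else
    []
termination_by (file_size - start).toNat
decreasing_by
  have : PART_SIZE = 16777216 := by norm_num [PART_SIZE]
  omega

def get_ranges_alt (file_size : Int) : List (Int × Int) :=
  get_ranges_alt_loop file_size 0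

-- ===== PRECONDITION & SPEC =====
def Spec_get_ranges (file_size : Int) (out : List (Int × Int)) : Prop := out = get_ranges_alt file_size
instance (file_size : Int) (out : List (Int × Int)) : Decidable (Spec_get_ranges file_size out) := by unfold Spec_get_ranges; infer_instance

-- ===== CLAIM (what is proved, stated in full; the proofs are below) =====
def Claim_equal_get_ranges : Prop := ∀ (file_size : Int), Dom_get_ranges file_size → Spec_get_ranges file_size (get_ranges file_size)

-- ===== LEMMAS AND PROOFS =====

lemma part_size_lit : PART_SIZE = 16777216 := by norm_num [PART_SIZE]

lemma pyRange_nonpos (k : Int) (hk : k ≤ 0) : PySem.List.pyRange 0 k 1 = [] := by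
  simp [PySem.List.pyRange]; omega

lemma map_pyRange_natCast (n : Nat) (f : Int → Int × Int) :
    (PySem.List.pyRange 0 ((n : Int)) 1).map f = (List.range n).map (fun k : Nat => f (k : Int)) := by
  rw [PySem.List.pyRange_zero_natCast, List.map_map]
  rfl

lemma B_unfold (fs start : Int) :
    get_ranges_alt_loop fs start =
      if start < fs then
        (start, min (start + PART_SIZE) fs - 1) ::
          get_ranges_alt_loop fs (start + PART_SIZE)
      else [] := by
  rw [get_ranges_alt_loop]

-- normal form of A on nonnegative input
lemma A_norm (fs : Int) (h : 0 ≤ fs) :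
    get_ranges fs =
      (List.range (fs / 16777216).toNat).map
          (fun i : Nat => (16777216 * (i : Int), 16777216 * ((i : Int) + 1) - 1)) ++
        (if (16777216 : Int) ∣ fs then [] else [(16777216 * (fs / 16777216), fs - 1)]) := by
  simp only [get_ranges, part_size_lit]
  rw [show PySem.Int.truncdiv fs 16777216 = fs / 16777216 from
        Int.tdiv_eq_ediv_of_nonneg h,
      show PySem.Int.floordiv (-fs) 16777216 = (-fs) / 16777216 from
        PySem.Int.floordiv_eq_ediv_of_pos (by norm_num)]
  have hm : ((fs / 16777216).toNat : Int) = fs / 16777216 := by omega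
  rw [show fs / 16777216 = (((fs / 16777216).toNat : Nat) : Int) from hm.symm,
      map_pyRange_natCast]
  simp only [Int.toNat_natCast]
  by_cases hd : (16777216 : Int) ∣ fs
  · rw [if_neg (by omega), if_pos hd, List.append_nil]
  · rw [if_pos (by omega), if_neg hd]

-- A on fs ≤ 0 : empty
lemma A_nonpos (fs : Int) (h : fs ≤ 0) : get_ranges fs = [] := by
  simp only [get_ranges, part_size_lit]
  have h1 : PySem.Int.truncdiv fs 16777216 = -((-fs) / 16777216) := by
    have h2 : (-fs).tdiv 16777216 = (-fs) / 16777216 :=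
      Int.tdiv_eq_ediv_of_nonneg (by omega)
    have h3 : fs.tdiv 16777216 = -((-fs).tdiv 16777216) := by
      rw [Int.neg_tdiv, neg_neg]
    simp only [PySem.Int.truncdiv, h3, h2]
  rw [h1,
      show PySem.Int.floordiv (-fs) 16777216 = (-fs) / 16777216 from
        PySem.Int.floordiv_eq_ediv_of_pos (by norm_num)]
  rw [if_neg (by omega), pyRange_nonpos _ (by omega), List.map_nil]

lemma altLoop_shift (fs start c : Int) :
    get_ranges_alt_loop (fs + c) (start + c) =
      (get_ranges_alt_loop fs start).map (fun p => (p.1 + c, p.2 + c)) := by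
  fun_induction get_ranges_alt_loop fs start with
  | case1 start h ih =>
    rw [B_unfold, if_pos (show start + c < _ + c by omega)]
    rw [show start + c + PART_SIZE = start + PART_SIZE + c by ring, ih]
    simp only [List.map_cons]
    congr 2
    have := part_size_lit
    omega
  | case2 start h =>
    rw [B_unfold, if_neg (show ¬ (start + c < _ + c) by omega)]
    simp

set_option maxRecDepth 8192 in
lemma main_lemma : ∀ (n : Nat) (fs : Int), fs ≤ (n : Int) →
    get_ranges fs = get_ranges_alt_loop fs 0 := by
  intro n
  induction n with
  | zero =>
    intro fs h
    rw [A_nonpos fs (by exact_mod_cast h), B_unfold, if_neg (by omega)]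
  | succ n ih =>
    intro fs h
    rcases le_or_gt fs 0 with h0 | h0
    · rw [A_nonpos fs h0, B_unfold, if_neg (by omega)]
    rcases le_or_gt fs 16777216 with h1 | h1
    · -- a single (possibly clamped) part on both sides
      have hB : get_ranges_alt_loop fs 0 = [(0, min (0 + PART_SIZE) fs - 1)] := by
        rw [B_unfold, if_pos (by omega), B_unfold,
            if_neg (by rw [part_size_lit]; omega)]
      rw [A_norm fs (by omega), hB, part_size_lit]
      rcases eq_or_lt_of_le h1 with hfull | hpart
      · -- fs = 16777216 : one full part, no tail on A's side
        subst hfull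
        norm_num
      · have hq : fs / 16777216 = 0 := by omega
        have hnd : ¬ (16777216 : Int) ∣ fs := by omega
        rw [hq, if_neg hnd]
        simp
        omega
    · -- fs > PART_SIZE : peel one full part off both sides
      have hq : fs / 16777216 = (fs - 16777216) / 16777216 + 1 := by omega
      have hq0 : 0 ≤ (fs - 16777216) / 16777216 := by omega
      have hB : get_ranges_alt_loop fs 0 =
          (0, min (0 + PART_SIZE) fs - 1) ::
            (get_ranges (fs - 16777216)).map
              (fun p => (p.1 + 16777216, p.2 + 16777216)) := by
        rw [B_unfold, if_pos (by omega)]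
        congr 1
        have hsh := altLoop_shift (fs - 16777216) 0 16777216
        rw [show fs - 16777216 + 16777216 = fs by ring] at hsh
        rw [show (0 : Int) + PART_SIZE = 0 + 16777216 by rw [part_size_lit], hsh,
            ← ih (fs - 16777216) (by push_cast at h ⊢; omega)]
      rw [hB, A_norm fs (by omega), A_norm (fs - 16777216) (by omega), hq]
      rw [show ((fs - 16777216) / 16777216 + 1).toNat
            = ((fs - 16777216) / 16777216).toNat + 1 by omega,
          List.range_succ_eq_map]
      simp only [List.map_cons, List.map_map, List.map_append, List.cons_append]
      refine congrArg₂ List.cons ?_ (congrArg₂ (· ++ ·) ?_ ?_)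
      · rw [part_size_lit]
        simp only [Nat.cast_zero, Prod.mk.injEq]
        constructor <;> omega
      · apply List.map_congr_left
        intro k _
        simp only [Function.comp_apply, Nat.succ_eq_add_one, Prod.mk.injEq]
        push_cast
        constructor <;> ring
      · have hdvd : ((16777216 : Int) ∣ fs) ↔ ((16777216 : Int) ∣ (fs - 16777216)) := by omega
        by_cases hd : (16777216 : Int) ∣ fs
        · rw [if_pos hd, if_pos (hdvd.mp hd)]
          rfl
        · rw [if_neg hd, if_neg (fun hx => hd (hdvd.mpr hx))]
          simp only [List.map_cons, List.map_nil, List.cons.injEq, and_true, Prod.mk.injEq]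
          exact ⟨by ring, by ring⟩

-- ===== VERDICT (by name: the statement is the Claim_ definition above) =====
theorem get_ranges_spec : Claim_equal_get_ranges := by
  intro fs _
  unfold Spec_get_ranges get_ranges_alt
  rcases le_or_gt fs 0 with h | h
  · rw [A_nonpos fs h, B_unfold, if_neg (by omega)]
  · exact main_lemma fs.toNat fs (by omega)
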